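-- pv_equiv track=rewrite | github.com/SuryakantKumar/HackerRank-Problem-Solving | Easy Level/Gemstones.py | gemstones
-- ===== SOURCE A (Python) =====
-- def gemstones(arr):
--     count = 0
--     for i in range(ord('a'), ord('z') +1):
--         flag = True
--         for e in arr:
--             if chr(i) not in e:
--                 flag = False
--         if flag == True:
--             count += 1
--
--     return count
-- ===== SOURCE B (Python) =====
-- def gemstones(arr):
--     seen = {}
--     for e in arr:
--         for c in dict.fromkeys(e):
--             seen[c] = seen.get(c, 0) + 1
--     count = 0
--     for i in range(ord('a'), ord('z') + 1):
--         if seen.get(chr(i), 0) == len(arr):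
--             count += 1
--     return count
-- ===== Notes on version B (the rewrite author's own statement) =====
-- stated objective: faster
-- what changed: B builds a per-letter occurrence table in one pass over the strings and then scans the fixed alphabet once, instead of A's rescan of all strings for each of the 26 letters.
import Mathlib
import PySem

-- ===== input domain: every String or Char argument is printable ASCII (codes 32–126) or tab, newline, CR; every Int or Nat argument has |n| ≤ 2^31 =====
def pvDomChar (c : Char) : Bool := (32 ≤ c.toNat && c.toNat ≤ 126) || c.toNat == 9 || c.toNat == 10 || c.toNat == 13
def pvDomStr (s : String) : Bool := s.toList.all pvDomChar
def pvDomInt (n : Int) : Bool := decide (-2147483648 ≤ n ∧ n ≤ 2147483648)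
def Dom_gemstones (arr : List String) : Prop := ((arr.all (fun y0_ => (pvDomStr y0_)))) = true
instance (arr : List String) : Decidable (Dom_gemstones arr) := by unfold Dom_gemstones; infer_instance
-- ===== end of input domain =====

-- B builds a per-letter occurrence table in one pass over the strings, then scans the
-- fixed alphabet once, instead of A's rescan of all strings for each of the 26 letters.

-- ===== PORT A =====
def gemstones (arr : List String) : Int :=
  (PySem.List.pyRange 97 123 1).foldl (fun count i =>
    let flag := arr.foldl (fun flag e =>
      if ¬ PySem.Str.isIn (String.ofList [Char.ofNat i.toNat]) e then false else flag) true
    if flag = true then count + 1 else count) 0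

-- ===== PORT B =====
def gemstones_alt (arr : List String) : Int :=
  let seen : PySem.Dict Char Int := arr.foldl (fun d e =>
    (PySem.List.dedup e.toList).foldl (fun d c => d.insert c (d.getD c 0 + 1)) d)
    PySem.Dict.empty
  (PySem.List.pyRange 97 123 1).foldl (fun count i =>
    if seen.getD (Char.ofNat i.toNat) 0 = (arr.length : Int) then count + 1 else count) 0

-- ===== PRECONDITION & SPEC =====
def Spec_gemstones (arr : List String) (out : Int) : Prop := out = gemstones_alt arr
instance (arr : List String) (out : Int) : Decidable (Spec_gemstones arr out) := by unfold Spec_gemstones; infer_instance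

-- ===== CLAIM (what is proved, stated in full; the proofs are below) =====
def Claim_equal_gemstones : Prop := ∀ (arr : List String), Dom_gemstones arr → Spec_gemstones arr (gemstones arr)

-- ===== LEMMAS AND PROOFS =====

-- A's inner loop computes 'b && all strings contain the substring'
theorem pv_flag_eq (s : String) (arr : List String) (b : Bool) :
    arr.foldl (fun flag e => if ¬ PySem.Str.isIn s e then false else flag) b
      = (b && arr.all (fun e => PySem.Str.isIn s e)) := by
  induction arr generalizing b with
  | nil => simp
  | cons e tl ih =>
    simp only [List.foldl_cons, List.all_cons, ih]
    cases PySem.Str.isIn s e <;> cases b <;> simp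

-- B's table lookup at c counts the strings containing c
theorem pv_seen_getD (arr : List String) (d : PySem.Dict Char Int) (c : Char) :
    (arr.foldl (fun d e =>
        (PySem.List.dedup e.toList).foldl (fun d c => d.insert c (d.getD c 0 + 1)) d) d).getD c 0
      = d.getD c 0 + (arr.countP (fun e => decide (c ∈ e.toList)) : Int) := by
  induction arr generalizing d with
  | nil => simp
  | cons e tl ih =>
    simp only [List.foldl_cons, ih, PySem.Dict.getD_foldl_insert_add_one, List.countP_cons]
    by_cases h : c ∈ e.toList
    · rw [List.count_eq_one_of_mem (PySem.List.nodup_dedup _) ((PySem.List.mem_dedup _ _).mpr h)]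
      simp [h]; ring
    · rw [List.count_eq_zero_of_not_mem (fun hm => h ((PySem.List.mem_dedup _ _).mp hm))]
      simp [h]

-- single-character membership: 'chr(i) in e' is list membership of the character
theorem pv_isIn_singleton (c : Char) (e : String) :
    PySem.Str.isIn (String.ofList [c]) e = true ↔ c ∈ e.toList := by
  rw [PySem.Str.isIn_iff_infix]
  simpa using List.singleton_infix_iff c e.toList

-- ===== VERDICT (by name: the statement is the Claim_ definition above) =====
theorem gemstones_spec : Claim_equal_gemstones := by
  intro arr _
  unfold Spec_gemstones gemstones gemstones_alt
  apply PySem.List.foldl_congr_mem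
  intro count i _
  simp only [pv_flag_eq, Bool.true_and]
  congr 1
  have hall : (arr.all (fun e => PySem.Str.isIn (String.ofList [Char.ofNat i.toNat]) e) = true)
      ↔ (arr.foldl (fun d e =>
          (PySem.List.dedup e.toList).foldl (fun d c => d.insert c (d.getD c 0 + 1)) d)
          PySem.Dict.empty).getD (Char.ofNat i.toNat) 0 = (arr.length : Int) := by
    rw [pv_seen_getD]
    simp only [PySem.Dict.getD_empty, zero_add, List.all_eq_true]
    constructor
    · intro h
      have : arr.countP (fun e => decide (Char.ofNat i.toNat ∈ e.toList)) = arr.length := by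
        rw [List.countP_eq_length]
        intro e he
        exact decide_eq_true ((pv_isIn_singleton _ _).mp (h e he))
      exact_mod_cast this
    · intro h e he
      have hc : arr.countP (fun e => decide (Char.ofNat i.toNat ∈ e.toList)) = arr.length := by
        exact_mod_cast h
      exact (pv_isIn_singleton _ _).mpr (of_decide_eq_true (List.countP_eq_length.mp hc e he))
  simp only [eq_iff_iff]
  constructor
  · intro h; exact hall.mp h
  · intro h; exact hall.mpr h
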